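-- pv_equiv track=rewrite | github.com/Shwetaagrawal1994/SQL-Practice-Questions | Basic_Python_Ques.py | common_lis_ele
-- ===== SOURCE A (Python) =====
-- def common_lis_ele(list1, list2):
--    if (isinstance(list1, list)) &  (isinstance(list2, list)) :
--         common_ele = []
--         for ele in list1:
--             if ele in list2 and ele not in common_ele: # 2nd condition added to avoid duplicates
--                 common_ele.append(ele)
--         return common_ele
--    elif (isinstance(list1, str)) &  (isinstance(list2, str)) :
--         list1 = list1.lower()
--         list2 = list2.lower()
--         common_ele = []
--         for ele in list1:
--             if ele in list2 and ele not in common_ele: # 2nd condition added to avoid duplicates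
--                 common_ele.append(ele)
--         return common_ele
--    else:
--         return "This function works only for list and strings"
-- ===== SOURCE B (Python) =====
-- def common_lis_ele(list1, list2):
--     if isinstance(list1, list) and isinstance(list2, list):
--         common = set(list1) & set(list2)
--         return sorted(common, key=list1.index)
--     elif isinstance(list1, str) and isinstance(list2, str):
--         l1, l2 = list1.lower(), list2.lower()
--         common = set(l1) & set(l2)
--         return sorted(common, key=l1.index)
--     else:
--         return "This function works only for list and strings"
-- ===== Notes on version B (the rewrite author's own statement) =====
-- stated objective: alternative
-- what changed: Instead of A's single interleaved loop that appends while dedup-checking the accumulator and scanning list2 linearly, B computes the hash-based set intersection set(list1) & set(list2) and then reconstructs the output order by sorting the common elements by their first-occurrence index in list1 (sorted(common, key=list1.index)).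
import Mathlib
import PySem

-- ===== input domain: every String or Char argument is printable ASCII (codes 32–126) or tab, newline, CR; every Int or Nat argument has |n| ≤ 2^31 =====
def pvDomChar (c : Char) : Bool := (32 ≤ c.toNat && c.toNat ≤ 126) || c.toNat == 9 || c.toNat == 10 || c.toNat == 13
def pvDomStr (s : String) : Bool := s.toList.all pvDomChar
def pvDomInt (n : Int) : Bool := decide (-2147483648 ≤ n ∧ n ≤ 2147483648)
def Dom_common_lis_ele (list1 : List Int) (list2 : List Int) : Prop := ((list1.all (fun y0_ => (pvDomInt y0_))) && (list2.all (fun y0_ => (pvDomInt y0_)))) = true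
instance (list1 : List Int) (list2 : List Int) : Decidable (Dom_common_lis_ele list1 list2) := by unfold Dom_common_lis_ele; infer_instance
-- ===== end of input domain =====

-- B replaces A's single interleaved dedup-and-filter loop by set intersection
-- (set(list1) & set(list2)) followed by sorting the common elements by their
-- first-occurrence index in list1; same values (alternative decomposition).
-- Under the type convention both arguments are List Int, so only A's list branch is in scope.

-- ===== PORT A =====
-- single pass: append ele when it is in list2 and not yet in the accumulator
def common_lis_ele (list1 : List Int) (list2 : List Int) : List Int :=
  list1.foldl (fun common_ele ele =>
    if ele ∈ list2 ∧ ele ∉ common_ele then common_ele ++ [ele] else common_ele) []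

-- ===== PORT B =====
-- common = set(list1) & set(list2); return sorted(common, key=list1.index)
-- (list1.index never raises here since every element of common is in list1,
--  so index? is always some; .getD 0 is that index)
def common_lis_ele_alt (list1 : List Int) (list2 : List Int) : List Int :=
  let common := PySem.Set.inter (PySem.Set.ofList list1) (PySem.Set.ofList list2)
  PySem.List.sorted common (fun x => (PySem.List.index? list1 x).getD 0) false

-- ===== PRECONDITION & SPEC =====
def Spec_common_lis_ele (list1 : List Int) (list2 : List Int) (out : List Int) : Prop := out = common_lis_ele_alt list1 list2
instance (list1 : List Int) (list2 : List Int) (out : List Int) : Decidable (Spec_common_lis_ele list1 list2 out) := by unfold Spec_common_lis_ele; infer_instance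

-- ===== CLAIM (what is proved, stated in full; the proofs are below) =====
def Claim_equal_common_lis_ele : Prop := ∀ (list1 : List Int) (list2 : List Int), Dom_common_lis_ele list1 list2 → Spec_common_lis_ele list1 list2 (common_lis_ele list1 list2)

-- ===== LEMMAS AND PROOFS =====

-- A's accumulator is the (· ∈ list2)-filter of the ordered-dedup accumulator.
theorem common_lis_ele_invariant (list2 : List Int) :
    ∀ (l : List Int) (u : List Int),
      l.foldl (fun common_ele ele =>
          if ele ∈ list2 ∧ ele ∉ common_ele then common_ele ++ [ele] else common_ele)
        (u.filter (fun ele => decide (ele ∈ list2)))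
      = (l.foldl PySem.Set.add u).filter (fun ele => decide (ele ∈ list2)) := by
  intro l
  induction l with
  | nil => intro u; rfl
  | cons e l ih =>
    intro u
    simp only [List.foldl_cons, PySem.Set.add]
    by_cases he2 : e ∈ list2
    · by_cases heu : e ∈ u
      · have hc : PySem.Set.contains u e = true := by simpa [PySem.Set.contains] using heu
        have hmem : e ∈ u.filter (fun ele => decide (ele ∈ list2)) :=
          List.mem_filter.mpr ⟨heu, by simpa using he2⟩
        rw [if_neg (by simp [he2, hmem]), if_pos hc, ih u]
      · have hc : ¬ PySem.Set.contains u e = true := by simpa [PySem.Set.contains] using heu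
        have hmem : e ∉ u.filter (fun ele => decide (ele ∈ list2)) := fun h =>
          heu (List.mem_filter.mp h).1
        rw [if_pos ⟨he2, hmem⟩, if_neg hc]
        have : u.filter (fun ele => decide (ele ∈ list2)) ++ [e]
            = (u ++ [e]).filter (fun ele => decide (ele ∈ list2)) := by
          simp [List.filter_append, he2]
        rw [this, ih (u ++ [e])]
    · have hmemf : (u ++ [e]).filter (fun ele => decide (ele ∈ list2))
          = u.filter (fun ele => decide (ele ∈ list2)) := by
        simp [List.filter_append, he2]
      rw [if_neg (by simp [he2])]
      by_cases hc : PySem.Set.contains u e = true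
      · rw [if_pos hc, ih u]
      · rw [if_neg hc, ← hmemf, ih (u ++ [e])]

-- first-occurrence indices are strictly increasing along the ordered dedup of l
theorem pairwise_index_dedup (l : List Int) :
    (PySem.List.dedup l).Pairwise
      (fun a b => (PySem.List.index? l a).getD 0 < (PySem.List.index? l b).getD 0) := by
  induction l using List.reverseRecOn with
  | nil => simp [PySem.List.dedup, PySem.Set.ofList]
  | append_singleton l x ih =>
    have hded : PySem.List.dedup (l ++ [x]) = PySem.Set.add (PySem.List.dedup l) x := by
      simp [PySem.List.dedup, PySem.Set.ofList_eq_foldl, List.foldl_append]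
    rw [hded, PySem.Set.add]
    have hmem_ded : ∀ a, a ∈ PySem.List.dedup l → a ∈ l := by
      intro a ha; exact (PySem.List.mem_dedup _ _).mp ha
    have hkey_eq : ∀ a ∈ PySem.List.dedup l,
        PySem.List.index? (l ++ [x]) a = PySem.List.index? l a := by
      intro a ha; exact PySem.List.index?_append_of_mem _ (hmem_ded a ha)
    by_cases hx : PySem.Set.contains (PySem.List.dedup l) x = true
    · rw [if_pos hx]
      refine ih.imp_of_mem ?_
      intro a b ha hb hab
      rw [hkey_eq a ha, hkey_eq b hb]; exact hab
    · rw [if_neg hx]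
      have hxl : x ∉ l := by
        intro hxl
        exact hx (by simpa [PySem.Set.contains_iff, PySem.List.mem_dedup] using hxl)
      have hxkey : PySem.List.index? (l ++ [x]) x = some l.length :=
        PySem.List.index?_append_singleton_self l x hxl
      rw [List.pairwise_append]
      refine ⟨ih.imp_of_mem (fun {a b} ha hb hab => by
          rw [hkey_eq a ha, hkey_eq b hb]; exact hab), by simp, ?_⟩
      intro a ha b hb
      have hb' : b = x := by simpa using hb
      subst hb'
      rw [hkey_eq a ha, hxkey]
      have hal : a ∈ l := hmem_ded a ha
      obtain ⟨k, hk⟩ := Option.isSome_iff_exists.mp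
        ((PySem.List.index?_isSome_iff l a).mpr hal)
      obtain ⟨hklt, -, -⟩ := PySem.List.getElem_of_index?_eq_some hk
      simp only [hk, Option.getD_some]
      exact hklt

-- ===== VERDICT (by name: the statement is the Claim_ definition above) =====
theorem common_lis_ele_spec : Claim_equal_common_lis_ele := by
  intro list1 list2 _
  unfold Spec_common_lis_ele common_lis_ele common_lis_ele_alt
  -- A's loop computes the filtered ordered dedup
  have hA : list1.foldl (fun common_ele ele =>
        if ele ∈ list2 ∧ ele ∉ common_ele then common_ele ++ [ele] else common_ele) []
      = (PySem.List.dedup list1).filter (fun ele => decide (ele ∈ list2)) := by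
    have h := common_lis_ele_invariant list2 list1 []
    simpa [PySem.List.dedup, PySem.Set.ofList_eq_foldl] using h
  -- B's intersection is the same filtered ordered dedup
  have hcommon : PySem.Set.inter (PySem.Set.ofList list1) (PySem.Set.ofList list2)
      = (PySem.List.dedup list1).filter (fun ele => decide (ele ∈ list2)) := by
    unfold PySem.Set.inter
    refine List.filter_congr ?_
    intro a _
    simp [PySem.Set.mem_ofList]
  -- and that list is already strictly index-sorted, so B's sort returns it unchanged
  have hpw := (pairwise_index_dedup list1).sublist
    (List.filter_sublist (l := PySem.List.dedup list1) (p := fun ele => decide (ele ∈ list2)))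
  rw [hA, hcommon]
  exact (PySem.List.sorted_eq_of_perm_of_pairwise_lt _ _ _ (List.Perm.refl _) hpw).symm
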